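-- pv_equiv track=rewrite | github.com/nochadisfaction/pixel | ai/pixel/data/disorder_symptom_mapper.py | _create_symptom_clusters
-- ===== SOURCE A (Python) =====
-- from typing import Dict, List, Optional, Any, Set, Tuple
--
-- def _create_symptom_clusters(symptoms: List[str]) -> Dict[str, List[str]]:
--     """Create logical clusters of related symptoms."""
--     clusters = {
--         "mood_symptoms": [],
--         "cognitive_symptoms": [],
--         "physical_symptoms": [],
--         "behavioral_symptoms": [],
--         "social_symptoms": []
--     }
--
--     for symptom in symptoms:
--         symptom_lower = symptom.lower()
--
--         # Mood cluster
--         if any(word in symptom_lower for word in ['mood', 'depressed', 'sad', 'hopeless', 'worthless']):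
--             clusters["mood_symptoms"].append(symptom)
--
--         # Cognitive cluster
--         elif any(word in symptom_lower for word in ['concentration', 'memory', 'thinking', 'decision']):
--             clusters["cognitive_symptoms"].append(symptom)
--
--         # Physical cluster
--         elif any(word in symptom_lower for word in ['sleep', 'appetite', 'energy', 'fatigue', 'weight']):
--             clusters["physical_symptoms"].append(symptom)
--
--         # Behavioral cluster
--         elif any(word in symptom_lower for word in ['agitation', 'retardation', 'impulsivity', 'avoidance']):
--             clusters["behavioral_symptoms"].append(symptom)
--
--         # Social cluster
--         elif any(word in symptom_lower for word in ['interpersonal', 'relationship', 'social', 'abandonment']):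
--             clusters["social_symptoms"].append(symptom)
--
--         # Default to behavioral if unclear
--         else:
--             clusters["behavioral_symptoms"].append(symptom)
--
--     # Remove empty clusters
--     return {k: v for k, v in clusters.items() if v}
-- ===== SOURCE B (Python) =====
-- _CLUSTER_KEYWORDS = [
--     ("mood_symptoms", ("mood", "depressed", "sad", "hopeless", "worthless")),
--     ("cognitive_symptoms", ("concentration", "memory", "thinking", "decision")),
--     ("physical_symptoms", ("sleep", "appetite", "energy", "fatigue", "weight")),
--     ("behavioral_symptoms", ("agitation", "retardation", "impulsivity", "avoidance")),
--     ("social_symptoms", ("interpersonal", "relationship", "social", "abandonment")),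
-- ]
--
--
-- def _classify(symptom):
--     low = symptom.lower()
--     for name, words in _CLUSTER_KEYWORDS:
--         if any(w in low for w in words):
--             return name
--     return "behavioral_symptoms"
--
--
-- def _create_symptom_clusters(symptoms):
--     result = {}
--     for name, _words in _CLUSTER_KEYWORDS:
--         group = [s for s in symptoms if _classify(s) == name]
--         if group:
--             result[name] = group
--     return result
-- ===== Notes on version B (the rewrite author's own statement) =====
-- stated objective: idiomatic
-- what changed: Replaces the single-pass if/elif dict-append loop by a data-driven (cluster, keywords) table with a first-match classifier, building each cluster by a per-cluster filter pass over the symptoms.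
import Mathlib
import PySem

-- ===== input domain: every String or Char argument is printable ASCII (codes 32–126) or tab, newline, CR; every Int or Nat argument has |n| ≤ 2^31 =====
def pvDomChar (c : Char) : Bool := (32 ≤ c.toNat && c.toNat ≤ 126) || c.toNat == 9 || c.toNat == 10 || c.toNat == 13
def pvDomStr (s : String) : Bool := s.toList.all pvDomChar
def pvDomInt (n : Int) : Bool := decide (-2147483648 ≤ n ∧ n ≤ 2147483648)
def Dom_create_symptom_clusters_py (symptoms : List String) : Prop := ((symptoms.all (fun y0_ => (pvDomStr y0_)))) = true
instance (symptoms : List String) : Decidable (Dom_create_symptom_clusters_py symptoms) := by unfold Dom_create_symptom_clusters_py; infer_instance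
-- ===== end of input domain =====

-- B replaces A's if/elif dict-append loop by a keyword table with a first-match classifier and one filter pass per cluster (idiomatic, same cost).

-- ===== PORT A =====
def create_symptom_clusters_py (symptoms : List String) : List (String × List String) :=
  let clusters : PySem.Dict String (List String) :=
    PySem.Dict.mk [("mood_symptoms", []), ("cognitive_symptoms", []), ("physical_symptoms", []),
                   ("behavioral_symptoms", []), ("social_symptoms", [])]
  let final := symptoms.foldl (fun d symptom =>
    let symptom_lower := PySem.Str.lower symptom
    if ["mood", "depressed", "sad", "hopeless", "worthless"].any (fun word => PySem.Str.isIn word symptom_lower) then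
      d.modify "mood_symptoms" [] (· ++ [symptom])
    else if ["concentration", "memory", "thinking", "decision"].any (fun word => PySem.Str.isIn word symptom_lower) then
      d.modify "cognitive_symptoms" [] (· ++ [symptom])
    else if ["sleep", "appetite", "energy", "fatigue", "weight"].any (fun word => PySem.Str.isIn word symptom_lower) then
      d.modify "physical_symptoms" [] (· ++ [symptom])
    else if ["agitation", "retardation", "impulsivity", "avoidance"].any (fun word => PySem.Str.isIn word symptom_lower) then
      d.modify "behavioral_symptoms" [] (· ++ [symptom])
    else if ["interpersonal", "relationship", "social", "abandonment"].any (fun word => PySem.Str.isIn word symptom_lower) then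
      d.modify "social_symptoms" [] (· ++ [symptom])
    else
      d.modify "behavioral_symptoms" [] (· ++ [symptom])) clusters
  final.items.filter (fun p => !p.2.isEmpty)

-- ===== PORT B =====
def pvKeywords : List (String × List String) :=
  [("mood_symptoms", ["mood", "depressed", "sad", "hopeless", "worthless"]),
   ("cognitive_symptoms", ["concentration", "memory", "thinking", "decision"]),
   ("physical_symptoms", ["sleep", "appetite", "energy", "fatigue", "weight"]),
   ("behavioral_symptoms", ["agitation", "retardation", "impulsivity", "avoidance"]),
   ("social_symptoms", ["interpersonal", "relationship", "social", "abandonment"])]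

def pvClassify (symptom : String) : String :=
  let low := PySem.Str.lower symptom
  match pvKeywords.find? (fun p => p.2.any (fun w => PySem.Str.isIn w low)) with
  | some p => p.1
  | none => "behavioral_symptoms"

def create_symptom_clusters_py_alt (symptoms : List String) : List (String × List String) :=
  pvKeywords.foldl (fun result p =>
    let group := symptoms.filter (fun s => pvClassify s == p.1)
    if group.isEmpty then result else result ++ [(p.1, group)]) []

-- ===== PRECONDITION & SPEC =====
def Spec_create_symptom_clusters_py (symptoms : List String) (out : List (String × List String)) : Prop := out = create_symptom_clusters_py_alt symptoms
instance (symptoms : List String) (out : List (String × List String)) : Decidable (Spec_create_symptom_clusters_py symptoms out) := by unfold Spec_create_symptom_clusters_py; infer_instance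

-- ===== CLAIM (what is proved, stated in full; the proofs are below) =====
def Claim_equal_create_symptom_clusters_py : Prop := ∀ (symptoms : List String), Dom_create_symptom_clusters_py symptoms → Spec_create_symptom_clusters_py symptoms (create_symptom_clusters_py symptoms)

-- ===== LEMMAS AND PROOFS =====

def pvFilt (k : String) (syms : List String) : List String :=
  syms.filter (fun s => pvClassify s == k)

def pvMk5 (l1 l2 l3 l4 l5 : List String) : PySem.Dict String (List String) :=
  PySem.Dict.mk [("mood_symptoms", l1), ("cognitive_symptoms", l2), ("physical_symptoms", l3),
                 ("behavioral_symptoms", l4), ("social_symptoms", l5)]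

lemma pvFoldA (syms : List String) (l1 l2 l3 l4 l5 : List String) :
    syms.foldl (fun d symptom =>
      if ["mood", "depressed", "sad", "hopeless", "worthless"].any (fun word => PySem.Str.isIn word (PySem.Str.lower symptom)) then
        d.modify "mood_symptoms" [] (· ++ [symptom])
      else if ["concentration", "memory", "thinking", "decision"].any (fun word => PySem.Str.isIn word (PySem.Str.lower symptom)) then
        d.modify "cognitive_symptoms" [] (· ++ [symptom])
      else if ["sleep", "appetite", "energy", "fatigue", "weight"].any (fun word => PySem.Str.isIn word (PySem.Str.lower symptom)) then
        d.modify "physical_symptoms" [] (· ++ [symptom])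
      else if ["agitation", "retardation", "impulsivity", "avoidance"].any (fun word => PySem.Str.isIn word (PySem.Str.lower symptom)) then
        d.modify "behavioral_symptoms" [] (· ++ [symptom])
      else if ["interpersonal", "relationship", "social", "abandonment"].any (fun word => PySem.Str.isIn word (PySem.Str.lower symptom)) then
        d.modify "social_symptoms" [] (· ++ [symptom])
      else
        d.modify "behavioral_symptoms" [] (· ++ [symptom])) (pvMk5 l1 l2 l3 l4 l5)
    = pvMk5 (l1 ++ pvFilt "mood_symptoms" syms) (l2 ++ pvFilt "cognitive_symptoms" syms)
            (l3 ++ pvFilt "physical_symptoms" syms) (l4 ++ pvFilt "behavioral_symptoms" syms)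
            (l5 ++ pvFilt "social_symptoms" syms) := by
  induction syms generalizing l1 l2 l3 l4 l5 with
  | nil => simp [pvFilt]
  | cons s rest ih =>
    simp only [List.foldl_cons]
    by_cases h1 : (List.any ["mood", "depressed", "sad", "hopeless", "worthless"] (fun word => PySem.Str.isIn word (PySem.Str.lower s))) = true
    · rw [if_pos h1]
      rw [show (pvMk5 l1 l2 l3 l4 l5).modify "mood_symptoms" [] (· ++ [s]) = pvMk5 (l1 ++ [s]) l2 l3 l4 l5 by
            simp [pvMk5, PySem.Dict.modify, PySem.Dict.insert, PySem.Dict.getD, PySem.Dict.get?, PySem.Dict.contains, PySem.Dict.items, PySem.Dict.keys]]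
      rw [ih]
      have hc : pvClassify s = "mood_symptoms" := by
        simp only [pvClassify, pvKeywords, List.find?, h1]
      simp [pvFilt, List.filter, hc, pvMk5]
    · rw [Bool.not_eq_true] at h1
      by_cases h2 : (List.any ["concentration", "memory", "thinking", "decision"] (fun word => PySem.Str.isIn word (PySem.Str.lower s))) = true
      · rw [if_neg (by rw [h1]; simp), if_pos h2]
        rw [show (pvMk5 l1 l2 l3 l4 l5).modify "cognitive_symptoms" [] (· ++ [s]) = pvMk5 l1 (l2 ++ [s]) l3 l4 l5 by
              simp [pvMk5, PySem.Dict.modify, PySem.Dict.insert, PySem.Dict.getD, PySem.Dict.get?, PySem.Dict.contains, PySem.Dict.items, PySem.Dict.keys]]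
        rw [ih]
        have hc : pvClassify s = "cognitive_symptoms" := by
          simp only [pvClassify, pvKeywords, List.find?, h1, h2]
        simp [pvFilt, List.filter, hc, pvMk5]
      · rw [Bool.not_eq_true] at h2
        by_cases h3 : (List.any ["sleep", "appetite", "energy", "fatigue", "weight"] (fun word => PySem.Str.isIn word (PySem.Str.lower s))) = true
        · rw [if_neg (by rw [h1]; simp), if_neg (by rw [h2]; simp), if_pos h3]
          rw [show (pvMk5 l1 l2 l3 l4 l5).modify "physical_symptoms" [] (· ++ [s]) = pvMk5 l1 l2 (l3 ++ [s]) l4 l5 by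
                simp [pvMk5, PySem.Dict.modify, PySem.Dict.insert, PySem.Dict.getD, PySem.Dict.get?, PySem.Dict.contains, PySem.Dict.items, PySem.Dict.keys]]
          rw [ih]
          have hc : pvClassify s = "physical_symptoms" := by
            simp only [pvClassify, pvKeywords, List.find?, h1, h2, h3]
          simp [pvFilt, List.filter, hc, pvMk5]
        · rw [Bool.not_eq_true] at h3
          by_cases h4 : (List.any ["agitation", "retardation", "impulsivity", "avoidance"] (fun word => PySem.Str.isIn word (PySem.Str.lower s))) = true
          · rw [if_neg (by rw [h1]; simp), if_neg (by rw [h2]; simp), if_neg (by rw [h3]; simp), if_pos h4]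
            rw [show (pvMk5 l1 l2 l3 l4 l5).modify "behavioral_symptoms" [] (· ++ [s]) = pvMk5 l1 l2 l3 (l4 ++ [s]) l5 by
                  simp [pvMk5, PySem.Dict.modify, PySem.Dict.insert, PySem.Dict.getD, PySem.Dict.get?, PySem.Dict.contains, PySem.Dict.items, PySem.Dict.keys]]
            rw [ih]
            have hc : pvClassify s = "behavioral_symptoms" := by
              simp only [pvClassify, pvKeywords, List.find?, h1, h2, h3, h4]
            simp [pvFilt, List.filter, hc, pvMk5]
          · rw [Bool.not_eq_true] at h4
            by_cases h5 : (List.any ["interpersonal", "relationship", "social", "abandonment"] (fun word => PySem.Str.isIn word (PySem.Str.lower s))) = true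
            · rw [if_neg (by rw [h1]; simp), if_neg (by rw [h2]; simp), if_neg (by rw [h3]; simp), if_neg (by rw [h4]; simp), if_pos h5]
              rw [show (pvMk5 l1 l2 l3 l4 l5).modify "social_symptoms" [] (· ++ [s]) = pvMk5 l1 l2 l3 l4 (l5 ++ [s]) by
                    simp [pvMk5, PySem.Dict.modify, PySem.Dict.insert, PySem.Dict.getD, PySem.Dict.get?, PySem.Dict.contains, PySem.Dict.items, PySem.Dict.keys]]
              rw [ih]
              have hc : pvClassify s = "social_symptoms" := by
                simp only [pvClassify, pvKeywords, List.find?, h1, h2, h3, h4, h5]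
              simp [pvFilt, List.filter, hc, pvMk5]
            · rw [Bool.not_eq_true] at h5
              rw [if_neg (by rw [h1]; simp), if_neg (by rw [h2]; simp), if_neg (by rw [h3]; simp), if_neg (by rw [h4]; simp), if_neg (by rw [h5]; simp)]
              rw [show (pvMk5 l1 l2 l3 l4 l5).modify "behavioral_symptoms" [] (· ++ [s]) = pvMk5 l1 l2 l3 (l4 ++ [s]) l5 by
                    simp [pvMk5, PySem.Dict.modify, PySem.Dict.insert, PySem.Dict.getD, PySem.Dict.get?, PySem.Dict.contains, PySem.Dict.items, PySem.Dict.keys]]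
              rw [ih]
              have hc : pvClassify s = "behavioral_symptoms" := by
                simp only [pvClassify, pvKeywords, List.find?, h1, h2, h3, h4, h5]
              simp [pvFilt, List.filter, hc, pvMk5]

-- ===== VERDICT (by name: the statement is the Claim_ definition above) =====
theorem create_symptom_clusters_py_spec : Claim_equal_create_symptom_clusters_py := by
  intro symptoms _
  unfold Spec_create_symptom_clusters_py
  show create_symptom_clusters_py symptoms = create_symptom_clusters_py_alt symptoms
  simp only [create_symptom_clusters_py]
  rw [show (PySem.Dict.mk [("mood_symptoms", ([] : List String)), ("cognitive_symptoms", []), ("physical_symptoms", []),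
                   ("behavioral_symptoms", []), ("social_symptoms", [])]) = pvMk5 [] [] [] [] [] from rfl]
  rw [pvFoldA symptoms [] [] [] [] []]
  simp only [create_symptom_clusters_py_alt, pvKeywords, List.foldl_cons, List.foldl_nil]
  have hcl : ∀ k : String, (symptoms.filter (fun s => pvClassify s == k)) = pvFilt k symptoms := fun _ => rfl
  rw [hcl, hcl, hcl, hcl, hcl]
  simp only [pvMk5, List.nil_append]
  by_cases e1 : (pvFilt "mood_symptoms" symptoms).isEmpty <;>
  by_cases e2 : (pvFilt "cognitive_symptoms" symptoms).isEmpty <;>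
  by_cases e3 : (pvFilt "physical_symptoms" symptoms).isEmpty <;>
  by_cases e4 : (pvFilt "behavioral_symptoms" symptoms).isEmpty <;>
  by_cases e5 : (pvFilt "social_symptoms" symptoms).isEmpty <;>
    simp [List.filter, e1, e2, e3, e4, e5]
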